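-- pv_equiv track=rewrite | github.com/AkashMummidi/resume-skill-verification-system | backend/utils/skill_policy.py | apply_skill_policy
-- ===== SOURCE A (Python) =====
-- NON_RATEABLE_ENTITIES = {
--     "github",
--     "ibm",
--     "ms office",
--     "office",
-- }
--
-- CANONICAL_SKILLS = {
--     "java syntax": "java",
--     "java fundamentals": "java",
--     "oop": "object oriented programming",
--     "problem solve": "Problem Solving",
-- }
--
-- def apply_skill_policy(confidence_map: dict[str, int]) -> dict[str, int]:
--
--     cleaned = {}
--
--     for skill, confidence in confidence_map.items():
--         skill_l = skill.lower().strip()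
--
--         #  Drop non-rateable entities
--         if skill_l in NON_RATEABLE_ENTITIES:
--             continue
--
--         #  Canonicalize skill names
--         if skill_l in CANONICAL_SKILLS:
--             skill_l = CANONICAL_SKILLS[skill_l]
--
--         #  Merge duplicates (keep max confidence)
--         if skill_l in cleaned:
--             cleaned[skill_l] = max(cleaned[skill_l], confidence)
--         else:
--             cleaned[skill_l] = confidence
--     return cleaned
-- ===== SOURCE B (Python) =====
-- NON_RATEABLE_ENTITIES = {
--     "github",
--     "ibm",
--     "ms office",
--     "office",
-- }
--
-- CANONICAL_SKILLS = {
--     "java syntax": "java",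
--     "java fundamentals": "java",
--     "oop": "object oriented programming",
--     "problem solve": "Problem Solving",
-- }
--
-- def apply_skill_policy(confidence_map: dict[str, int]) -> dict[str, int]:
--     # Pass 1: flatten into a plain list of (canonical key, confidence) pairs,
--     # dropping non-rateable entities; no accumulator dict, no merging here.
--     pairs = []
--     for skill, confidence in confidence_map.items():
--         k = skill.lower().strip()
--         if k not in NON_RATEABLE_ENTITIES:
--             pairs.append((CANONICAL_SKILLS.get(k, k), confidence))
--     # Pass 2: one comprehension; for every key, the value is the max over a
--     # full scan of the pair list (duplicate keys re-insert the same max, so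
--     # first-seen order is preserved by dict semantics).
--     return {k: max(c2 for k2, c2 in pairs if k2 == k) for k, _ in pairs}
-- ===== Notes on version B (the rewrite author's own statement) =====
-- stated objective: alternative
-- what changed: Replaced A's single-pass dict accumulator with a running max by a dict-free flatten pass producing a plain (canonical key, confidence) pair list, followed by a comprehension whose value for each key is the max over a full scan of that list (trades A's O(n) incremental merge for an O(n^2) scan-per-key formulation).
import Mathlib
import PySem

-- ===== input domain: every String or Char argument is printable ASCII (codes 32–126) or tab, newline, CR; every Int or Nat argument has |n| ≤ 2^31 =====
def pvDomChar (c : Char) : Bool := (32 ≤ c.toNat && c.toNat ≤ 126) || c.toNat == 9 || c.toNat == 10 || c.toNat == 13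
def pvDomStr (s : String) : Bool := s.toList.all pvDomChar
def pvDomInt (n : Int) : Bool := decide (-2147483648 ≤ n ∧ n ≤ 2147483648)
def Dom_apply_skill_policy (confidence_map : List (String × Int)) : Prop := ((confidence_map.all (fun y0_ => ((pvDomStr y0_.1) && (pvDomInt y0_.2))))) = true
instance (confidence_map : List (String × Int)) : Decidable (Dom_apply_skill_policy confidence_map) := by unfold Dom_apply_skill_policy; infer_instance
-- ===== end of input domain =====

-- B replaces A's single-pass running-max dict accumulator by a dict-free flatten pass
-- (a plain list of canonical (key, confidence) pairs) plus a per-key full-scan max; same result, different algorithm.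

-- module constants shared by both Pythons
def NON_RATEABLE_ENTITIES : PySem.Set String :=
  PySem.Set.ofList ["github", "ibm", "ms office", "office"]

def CANONICAL_SKILLS : PySem.Dict String String :=
  PySem.Dict.ofList [("java syntax", "java"), ("java fundamentals", "java"),
    ("oop", "object oriented programming"), ("problem solve", "Problem Solving")]

-- ===== PORT A =====
def apply_skill_policy (confidence_map : List (String × Int)) : List (String × Int) :=
  (confidence_map.foldl
    (fun (cleaned : PySem.Dict String Int) (p : String × Int) =>
      let skill_l := PySem.Str.strip (PySem.Str.lower p.1)
      if NON_RATEABLE_ENTITIES.contains skill_l then cleaned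
      else
        let skill_l := match CANONICAL_SKILLS.get? skill_l with
          | some c => c
          | none => skill_l
        match cleaned.get? skill_l with
        | some v => cleaned.insert skill_l (max v p.2)
        | none => cleaned.insert skill_l p.2)
    PySem.Dict.empty).items

-- ===== PORT B =====
-- max() of a Python list of ints; in B it is only applied to lists containing
-- the scanned row's own confidence, so the [] case is unreachable there.
def pyMaxList (l : List Int) : Int :=
  match l with
  | [] => 0
  | h :: t => t.foldl max h

def apply_skill_policy_alt (confidence_map : List (String × Int)) : List (String × Int) :=
  -- Pass 1: flatten into a plain list of (canonical key, confidence) pairs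
  let pairs : List (String × Int) :=
    confidence_map.foldl
      (fun (acc : List (String × Int)) (p : String × Int) =>
        let k := PySem.Str.strip (PySem.Str.lower p.1)
        if NON_RATEABLE_ENTITIES.contains k then acc
        else acc ++ [((match CANONICAL_SKILLS.get? k with
                       | some c => c
                       | none => k), p.2)])
      []
  -- Pass 2: dict comprehension; value = max over a full scan of pairs
  (pairs.foldl
    (fun (d : PySem.Dict String Int) (q : String × Int) =>
      d.insert q.1 (pyMaxList (pairs.filterMap
        (fun r => if r.1 == q.1 then some r.2 else none))))
    PySem.Dict.empty).items

-- ===== PRECONDITION & SPEC =====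
def Spec_apply_skill_policy (confidence_map : List (String × Int)) (out : List (String × Int)) : Prop := out = apply_skill_policy_alt confidence_map
instance (confidence_map : List (String × Int)) (out : List (String × Int)) : Decidable (Spec_apply_skill_policy confidence_map out) := by unfold Spec_apply_skill_policy; infer_instance

-- ===== CLAIM (what is proved, stated in full; the proofs are below) =====
def Claim_equal_apply_skill_policy : Prop := ∀ (confidence_map : List (String × Int)), Dom_apply_skill_policy confidence_map → Spec_apply_skill_policy confidence_map (apply_skill_policy confidence_map)

-- ===== LEMMAS AND PROOFS =====

-- canonicalization of one raw pair: none = dropped (non-rateable)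
def pvPF (p : String × Int) : Option (String × Int) :=
  if NON_RATEABLE_ENTITIES.contains (PySem.Str.strip (PySem.Str.lower p.1)) then none
  else some ((match CANONICAL_SKILLS.get? (PySem.Str.strip (PySem.Str.lower p.1)) with
              | some c => c
              | none => PySem.Str.strip (PySem.Str.lower p.1)), p.2)

-- A's merge step on an already-canonicalized pair
def pvMStep (d : PySem.Dict String Int) (q : String × Int) : PySem.Dict String Int :=
  match d.get? q.1 with
  | some v => d.insert q.1 (max v q.2)
  | none => d.insert q.1 q.2

-- confidences of key k in a pair list
def pvOcc (ps : List (String × Int)) (k : String) : List Int :=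
  ps.filterMap (fun r => if r.1 == k then some r.2 else none)

-- first-occurrence entries of ps (keys not in ks), valued by suffix max
def pvFirsts (ks : List String) : List (String × Int) → List (String × Int)
  | [] => []
  | q :: t =>
    if ks.contains q.1 then pvFirsts ks t
    else (q.1, List.foldl max q.2 (pvOcc t q.1)) :: pvFirsts (q.1 :: ks) t

-- first-occurrence keys of ps not in ks
def pvNewKeys (ks : List String) : List (String × Int) → List String
  | [] => []
  | q :: t =>
    if ks.contains q.1 then pvNewKeys ks t
    else q.1 :: pvNewKeys (q.1 :: ks) t

theorem pvL0 (cm : List (String × Int)) (acc : List (String × Int)) :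
    cm.foldl
      (fun (acc : List (String × Int)) (p : String × Int) =>
        let k := PySem.Str.strip (PySem.Str.lower p.1)
        if NON_RATEABLE_ENTITIES.contains k then acc
        else acc ++ [((match CANONICAL_SKILLS.get? k with
                       | some c => c
                       | none => k), p.2)]) acc
    = acc ++ cm.filterMap pvPF := by
  induction cm generalizing acc with
  | nil => simp
  | cons p t ih =>
    simp only [List.foldl_cons, List.filterMap_cons]
    by_cases h : NON_RATEABLE_ENTITIES.contains (PySem.Str.strip (PySem.Str.lower p.1))
    · have hp : pvPF p = none := by simp only [pvPF, h, if_true]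
      rw [hp]
      simp only [h, if_true]
      exact ih acc
    · simp only [pvPF, h, Bool.false_eq_true, if_false]
      rw [ih, List.append_assoc]
      rfl

theorem pvL1 (cm : List (String × Int)) (d : PySem.Dict String Int) :
    cm.foldl
      (fun (cleaned : PySem.Dict String Int) (p : String × Int) =>
        let skill_l := PySem.Str.strip (PySem.Str.lower p.1)
        if NON_RATEABLE_ENTITIES.contains skill_l then cleaned
        else
          let skill_l := match CANONICAL_SKILLS.get? skill_l with
            | some c => c
            | none => skill_l
          match cleaned.get? skill_l with
          | some v => cleaned.insert skill_l (max v p.2)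
          | none => cleaned.insert skill_l p.2) d
    = (cm.filterMap pvPF).foldl pvMStep d := by
  induction cm generalizing d with
  | nil => simp only [List.foldl_nil, List.filterMap_nil]
  | cons p t ih =>
    simp only [List.foldl_cons, List.filterMap_cons]
    by_cases h : NON_RATEABLE_ENTITIES.contains (PySem.Str.strip (PySem.Str.lower p.1))
    · have hp : pvPF p = none := by simp only [pvPF, h, if_true]
      rw [hp]
      simp only [h, if_true]
      exact ih d
    · have hp : pvPF p = some ((match CANONICAL_SKILLS.get? (PySem.Str.strip (PySem.Str.lower p.1)) with
          | some c => c
          | none => PySem.Str.strip (PySem.Str.lower p.1)), p.2) := by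
        simp only [pvPF, h, Bool.false_eq_true, if_false]
      rw [hp]
      simp only [h, Bool.false_eq_true, if_false, List.foldl_cons]
      rw [ih]
      simp only [pvMStep]

theorem pvFirsts_congr (ps : List (String × Int)) (ks1 ks2 : List String)
    (h : ∀ x, x ∈ ks1 ↔ x ∈ ks2) : pvFirsts ks1 ps = pvFirsts ks2 ps := by
  induction ps generalizing ks1 ks2 with
  | nil => rfl
  | cons q t ih =>
    have hc : ks1.contains q.1 = ks2.contains q.1 := by
      by_cases hm : q.1 ∈ ks1
      · simp [hm, (h q.1).1 hm]
      · have hm2 : q.1 ∉ ks2 := fun hx => hm ((h q.1).2 hx)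
        simp [hm, hm2]
    simp only [pvFirsts, hc]
    by_cases h2 : ks2.contains q.1 = true
    · simp only [h2, if_true]
      exact ih ks1 ks2 h
    · simp only [h2, Bool.false_eq_true, if_false]
      rw [ih (q.1 :: ks1) (q.1 :: ks2) (by intro x; simp [h x])]

theorem pvNewKeys_congr (ps : List (String × Int)) (ks1 ks2 : List String)
    (h : ∀ x, x ∈ ks1 ↔ x ∈ ks2) : pvNewKeys ks1 ps = pvNewKeys ks2 ps := by
  induction ps generalizing ks1 ks2 with
  | nil => rfl
  | cons q t ih =>
    have hc : ks1.contains q.1 = ks2.contains q.1 := by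
      by_cases hm : q.1 ∈ ks1
      · simp [hm, (h q.1).1 hm]
      · have hm2 : q.1 ∉ ks2 := fun hx => hm ((h q.1).2 hx)
        simp [hm, hm2]
    simp only [pvNewKeys, hc]
    by_cases h2 : ks2.contains q.1 = true
    · simp only [h2, if_true]
      exact ih ks1 ks2 h
    · simp only [h2, Bool.false_eq_true, if_false]
      rw [ih (q.1 :: ks1) (q.1 :: ks2) (by intro x; simp [h x])]

theorem pvOcc_append (l1 l2 : List (String × Int)) (k : String) :
    pvOcc (l1 ++ l2) k = pvOcc l1 k ++ pvOcc l2 k := by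
  simp [pvOcc, List.filterMap_append]

theorem pvL2 (ps : List (String × Int)) (d : PySem.Dict String Int) (hnd : d.keys.Nodup) :
    (ps.foldl pvMStep d).items
    = d.items.map (fun q => (q.1, List.foldl max q.2 (pvOcc ps q.1))) ++ pvFirsts d.keys ps := by
  induction ps generalizing d with
  | nil => simp [pvOcc, pvFirsts]
  | cons q t ih =>
    simp only [List.foldl_cons]
    cases hg : d.get? q.1 with
    | some v =>
      have hcon : d.contains q.1 = true := by
        rw [PySem.Dict.contains_eq_isSome_get?, hg]; rfl
      have hkc : d.keys.contains q.1 = true :=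
        List.contains_iff_mem.mpr ((PySem.Dict.contains_iff_mem_keys d q.1).mp hcon)
      rw [show pvMStep d q = d.insert q.1 (max v q.2) from by simp [pvMStep, hg]]
      rw [ih (d.insert q.1 (max v q.2)) (PySem.Dict.nodup_keys_insert d q.1 (max v q.2) hnd)]
      rw [PySem.Dict.items_insert_of_contains d (max v q.2) hcon,
          PySem.Dict.keys_insert_of_contains d (max v q.2) hcon, List.map_map]
      have hfr : pvFirsts d.keys (q :: t) = pvFirsts d.keys t := by
        simp only [pvFirsts, hkc, if_true]
      rw [hfr]
      congr 1
      apply List.map_congr_left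
      intro a ha
      by_cases hak : a.1 = q.1
      · have hga : d.get? a.1 = some a.2 :=
          PySem.Dict.get?_of_mem_items d (by simpa using ha) hnd
        have hav : a.2 = v := by
          rw [hak, hg] at hga
          exact (Option.some.injEq _ _).mp hga.symm
        simp [Function.comp, hak, hav, pvOcc]
      · simp [Function.comp, hak, Ne.symm hak, pvOcc]
    | none =>
      have hcon : d.contains q.1 = false := by
        rw [PySem.Dict.contains_eq_isSome_get?, hg]; rfl
      have hnm : q.1 ∉ d.keys := (PySem.Dict.get?_eq_none_iff_not_mem_keys d q.1).mp hg
      have hkc : d.keys.contains q.1 = false := by simpa using hnm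
      rw [show pvMStep d q = d.insert q.1 q.2 from by simp [pvMStep, hg]]
      rw [ih (d.insert q.1 q.2) (PySem.Dict.nodup_keys_insert d q.1 q.2 hnd)]
      rw [PySem.Dict.items_insert_of_not_contains d q.2 hcon,
          PySem.Dict.keys_insert_of_not_contains d q.2 hcon, List.map_append]
      have hfr : pvFirsts d.keys (q :: t)
          = (q.1, List.foldl max q.2 (pvOcc t q.1)) :: pvFirsts (q.1 :: d.keys) t := by
        simp only [pvFirsts, hkc, Bool.false_eq_true, if_false]
      rw [hfr, pvFirsts_congr t (d.keys ++ [q.1]) (q.1 :: d.keys) (by intro x; simp [or_comm]),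
          List.append_assoc]
      congr 1
      apply List.map_congr_left
      intro a ha
      have ha1 : a.1 ≠ q.1 := by
        intro hx
        exact hnm (hx ▸ PySem.Dict.mem_keys_of_mem_items d ha)
      simp [pvOcc, Ne.symm ha1]

theorem pvL4 (suf : List (String × Int)) (d : PySem.Dict String Int) (F : String → Int)
    (hnd : d.keys.Nodup) (hv : ∀ q ∈ d.items, q.2 = F q.1) :
    (suf.foldl (fun d q => d.insert q.1 (F q.1)) d).items
    = d.items ++ (pvNewKeys d.keys suf).map (fun k => (k, F k)) := by
  induction suf generalizing d with
  | nil => simp [pvNewKeys]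
  | cons q t ih =>
    simp only [List.foldl_cons]
    have hpres : ∀ a ∈ (d.insert q.1 (F q.1)).items, a.2 = F a.1 := by
      intro a ha
      rcases (PySem.Dict.mem_items_insert d q.1 (F q.1) a).mp ha with h0 | h0
      · rw [h0]
      · exact hv a h0.1
    by_cases hcon : d.contains q.1
    · have hkc : d.keys.contains q.1 = true :=
        List.contains_iff_mem.mpr ((PySem.Dict.contains_iff_mem_keys d q.1).mp hcon)
      have hit : (d.insert q.1 (F q.1)).items = d.items := by
        rw [PySem.Dict.items_insert_of_contains d (F q.1) hcon]
        conv_rhs => rw [← List.map_id d.items]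
        apply List.map_congr_left
        intro a ha
        obtain ⟨a1, a2⟩ := a
        by_cases hak : a1 = q.1
        · subst hak
          have h2 : a2 = F q.1 := hv _ ha
          subst h2
          simp
        · simp [hak]
      rw [ih (d.insert q.1 (F q.1)) (PySem.Dict.nodup_keys_insert d q.1 (F q.1) hnd) hpres,
          hit, PySem.Dict.keys_insert_of_contains d (F q.1) hcon]
      simp only [pvNewKeys, hkc, if_true]
    · have hconf : d.contains q.1 = false := by simpa using hcon
      have hnm : q.1 ∉ d.keys := fun hx =>
        hcon ((PySem.Dict.contains_iff_mem_keys d q.1).mpr hx)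
      have hkc : d.keys.contains q.1 = false := by simpa using hnm
      rw [ih (d.insert q.1 (F q.1)) (PySem.Dict.nodup_keys_insert d q.1 (F q.1) hnd) hpres,
          PySem.Dict.items_insert_of_not_contains d (F q.1) hconf,
          PySem.Dict.keys_insert_of_not_contains d (F q.1) hconf,
          pvNewKeys_congr t (d.keys ++ [q.1]) (q.1 :: d.keys) (by intro x; simp [or_comm])]
      simp only [pvNewKeys, hkc, Bool.false_eq_true, if_false, List.map_cons, List.append_assoc,
        List.cons_append, List.nil_append]

theorem pvL5 (ps : List (String × Int)) (ks : List String) (pre : List (String × Int))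
    (h : ∀ x, ks.contains x = false → pvOcc pre x = []) :
    pvFirsts ks ps = (pvNewKeys ks ps).map (fun k => (k, pyMaxList (pvOcc (pre ++ ps) k))) := by
  induction ps generalizing ks pre with
  | nil => simp [pvFirsts, pvNewKeys]
  | cons q t ih =>
    have hsplit : pre ++ q :: t = (pre ++ [q]) ++ t := by simp
    by_cases hkc : ks.contains q.1
    · have hmem : q.1 ∈ ks := List.contains_iff_mem.mp hkc
      have hpre : ∀ x, ks.contains x = false → pvOcc (pre ++ [q]) x = [] := by
        intro x hx
        have hxm : x ∉ ks := by simpa using hx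
        have hne : q.1 ≠ x := fun he => hxm (he ▸ hmem)
        rw [pvOcc_append, h x hx]
        simp [pvOcc, hne]
      rw [hsplit]
      simp only [pvFirsts, pvNewKeys, hkc, if_true]
      exact ih ks (pre ++ [q]) hpre
    · have hkcf : ks.contains q.1 = false := by simpa using hkc
      have hpre : ∀ x, (q.1 :: ks).contains x = false → pvOcc (pre ++ [q]) x = [] := by
        intro x hx
        have hx2 : ¬x = q.1 ∧ x ∉ ks := by simpa [List.contains_cons] using hx
        have hxk : ks.contains x = false := by simpa using hx2.2
        have hne : q.1 ≠ x := fun he => hx2.1 he.symm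
        rw [pvOcc_append, h x hxk]
        simp [pvOcc, hne]
      have hocc : pvOcc ((pre ++ [q]) ++ t) q.1 = q.2 :: pvOcc t q.1 := by
        rw [pvOcc_append, pvOcc_append, h q.1 hkcf]
        simp [pvOcc]
      rw [hsplit]
      simp only [pvFirsts, pvNewKeys, hkcf, Bool.false_eq_true, if_false, List.map_cons]
      rw [ih (q.1 :: ks) (pre ++ [q]) hpre, hocc]
      rfl

-- ===== VERDICT (by name: the statement is the Claim_ definition above) =====
theorem apply_skill_policy_spec : Claim_equal_apply_skill_policy := by
  intro cm _
  show apply_skill_policy cm = apply_skill_policy_alt cm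
  have hemp : (PySem.Dict.empty : PySem.Dict String Int).items = [] := rfl
  have hnd0 : (PySem.Dict.empty : PySem.Dict String Int).keys.Nodup := by
    rw [PySem.Dict.keys_empty]; exact List.nodup_nil
  have hA : apply_skill_policy cm = pvFirsts [] (cm.filterMap pvPF) := by
    unfold apply_skill_policy
    rw [pvL1 cm PySem.Dict.empty, pvL2 (cm.filterMap pvPF) PySem.Dict.empty hnd0,
        PySem.Dict.keys_empty, hemp]
    simp
  have hB : apply_skill_policy_alt cm
      = ((cm.filterMap pvPF).foldl
          (fun d q => d.insert q.1 ((fun k => pyMaxList (pvOcc (cm.filterMap pvPF) k)) q.1))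
          PySem.Dict.empty).items := by
    unfold apply_skill_policy_alt
    rw [pvL0 cm []]
    rfl
  rw [hA, hB,
      pvL4 (cm.filterMap pvPF) PySem.Dict.empty
        (fun k => pyMaxList (pvOcc (cm.filterMap pvPF) k)) hnd0
        (by intro a ha; rw [hemp] at ha; cases ha),
      PySem.Dict.keys_empty, hemp,
      pvL5 (cm.filterMap pvPF) [] [] (by intro x _; rfl)]
  simp
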